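-- pv_equiv track=rewrite | github.com/ErwenL/lumerical-docs | scripts/section_scheduler.py | create_sections_by_letter_range
-- ===== SOURCE A (Python) =====
-- from collections import defaultdict
-- from typing import Dict, List, Optional, Tuple
--
-- def create_sections_by_letter_range(
--     commands: List[str],
--     num_sections: int,
--     strategy: str = "balanced"
-- ) -> Dict[int, List[str]]:
--     """Create sections by dividing letter ranges.
--
--     Args:
--         commands: List of command names.
--         num_sections: Number of sections to create.
--         strategy: Allocation strategy: "balanced" (equal commands) or "letter" (by letter groups).
--
--     Returns:
--         Dictionary mapping section_id to list of commands.
--     """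
--     if not commands:
--         return {}
--
--     # Sort commands
--     sorted_commands = sorted(commands)
--
--     if strategy == "balanced":
--         # Balanced allocation: equal number of commands per section
--         section_size = len(sorted_commands) // num_sections
--         remainder = len(sorted_commands) % num_sections
--
--         sections = {}
--         start = 0
--         for i in range(num_sections):
--             # Add one extra command to first 'remainder' sections
--             end = start + section_size + (1 if i < remainder else 0)
--             sections[i + 1] = sorted_commands[start:end]
--             start = end
--
--         return sections
--
--     elif strategy == "letter":
--         # Group by first letter
--         letter_groups = defaultdict(list)
--         for cmd in sorted_commands:
--             first_letter = cmd[0].upper() if cmd else ""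
--             letter_groups[first_letter].append(cmd)
--
--         # Sort letter groups
--         sorted_letters = sorted(letter_groups.keys())
--
--         # Distribute letter groups among sections
--         sections = {i + 1: [] for i in range(num_sections)}
--         section_loads = [0] * num_sections
--
--         for letter in sorted_letters:
--             group_commands = letter_groups[letter]
--             group_size = len(group_commands)
--
--             # Find section with smallest load
--             min_section = section_loads.index(min(section_loads))
--             sections[min_section + 1].extend(group_commands)
--             section_loads[min_section] += group_size
--
--         return sections
--
--     else:
--         raise ValueError(f"Unknown strategy: {strategy}")
-- ===== SOURCE B (Python) =====
-- def create_sections_by_letter_range(commands, num_sections, strategy="balanced"):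
--     """Create sections by dividing letter ranges.
--
--     "balanced": consume the sorted list chunk by chunk; "letter": keep a sorted
--     (load, index) priority queue and always pop the front (least-loaded section,
--     lowest index on ties), re-inserting the updated load in order.
--     """
--     if not commands:
--         return {}
--     sorted_commands = sorted(commands)
--     if strategy == "balanced":
--         q, r = divmod(len(sorted_commands), num_sections)
--         sections = {}
--         rest = sorted_commands
--         section_id = 1
--         while section_id <= num_sections:
--             take = q + (1 if r > 0 else 0)
--             sections[section_id] = rest[:take]
--             rest = rest[take:]
--             r -= 1
--             section_id += 1
--         return sections
--     elif strategy == "letter":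
--         groups = {}
--         for cmd in sorted_commands:
--             key = cmd[0].upper() if cmd else ""
--             groups.setdefault(key, []).append(cmd)
--         buckets = [[] for _ in range(num_sections)]
--         pq = [(0, i) for i in range(num_sections)]  # sorted (load, index) queue
--         for letter in sorted(groups):
--             group = groups[letter]
--             load, idx = pq[0]
--             buckets[idx] = buckets[idx] + group
--             pq = _insort(pq[1:], (load + len(group), idx))
--         return {i + 1: bucket for i, bucket in enumerate(buckets)}
--     else:
--         raise ValueError(f"Unknown strategy: {strategy}")
--
--
-- def _insort(pq, item):
--     """Insert item into the sorted list pq, keeping it sorted (after equals)."""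
--     done = []
--     it = iter(pq)
--     for o in it:
--         if item < o:
--             return done + [item, o] + list(it)
--         done.append(o)
--     return done + [item]
-- ===== Notes on version B (the rewrite author's own statement) =====
-- stated objective: alternative
-- what changed: The balanced branch consumes the sorted list chunk by chunk in a while loop instead of computing start/end indices into the full list, and the letter branch replaces the per-group min(loads)+.index() double rescans with a sorted (load, index) priority queue: pop the front for the least-loaded section (lowest index on ties) and re-insert the updated load in sorted position.
import Mathlib
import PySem

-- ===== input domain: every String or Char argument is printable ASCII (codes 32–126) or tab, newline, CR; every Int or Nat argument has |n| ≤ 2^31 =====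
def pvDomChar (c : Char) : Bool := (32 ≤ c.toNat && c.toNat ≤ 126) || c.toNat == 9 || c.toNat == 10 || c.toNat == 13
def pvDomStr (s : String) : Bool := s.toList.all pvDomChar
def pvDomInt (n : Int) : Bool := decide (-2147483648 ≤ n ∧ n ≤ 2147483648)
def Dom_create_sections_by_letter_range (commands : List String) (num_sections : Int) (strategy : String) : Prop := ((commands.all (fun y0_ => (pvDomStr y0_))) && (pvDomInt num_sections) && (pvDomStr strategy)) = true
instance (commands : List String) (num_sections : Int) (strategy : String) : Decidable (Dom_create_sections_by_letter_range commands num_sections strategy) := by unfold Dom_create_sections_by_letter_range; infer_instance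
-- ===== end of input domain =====

-- B consumes the sorted list chunk by chunk for "balanced" (no start/end index
-- arithmetic) and, for "letter", replaces A's min()+.index() rescans by a sorted
-- (load, index) priority queue popped at the front (objective: alternative; same
-- behaviour wherever the Python A returns).

-- ===== PORT A =====
-- first_letter = cmd[0].upper() if cmd else ""   (cmd[0] is a 1-char string)
def pvFirstKey (cmd : String) : String :=
  match PySem.Str.pyGet? cmd 0 with
  | some c => PySem.Str.upper (String.ofList [c])
  | none => ""

-- loop body of A's "for letter in sorted_letters" (kept as a named helper)
def pvAStep (letter_groups : PySem.Dict String (List String))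
    (st : PySem.Dict Int (List String) × List Int) (letter : String) :
    PySem.Dict Int (List String) × List Int :=
  let group_commands := letter_groups.getD letter []
  let group_size : Int := PySem.List.len group_commands
  match PySem.List.min? st.2 (fun x => x) with
  | none => st          -- Python: min([]) raises ValueError — excluded by Pre_
  | some m =>
    match PySem.List.index? st.2 m with
    | none => st        -- unreachable: the minimum is a member of the list
    | some ms =>
      (st.1.modify ((ms : Int) + 1) [] (fun v => v ++ group_commands),
       PySem.List.pySetD st.2 (ms : Int) (PySem.List.pyGetD st.2 (ms : Int) 0 + group_size))

def create_sections_by_letter_range (commands : List String) (num_sections : Int) (strategy : String) : List (Int × List String) :=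
  if commands = [] then []
  else
    let sorted_commands := PySem.List.sorted commands (fun x => x) false
    if strategy = "balanced" then
      let section_size := PySem.Int.floordiv (PySem.List.len sorted_commands) num_sections
      let remainder := PySem.Int.mod (PySem.List.len sorted_commands) num_sections
      let fin := (PySem.List.pyRange 0 num_sections 1).foldl
        (fun (st : PySem.Dict Int (List String) × Int) i =>
          let e := st.2 + section_size + (if i < remainder then 1 else 0)
          (st.1.insert (i + 1) (PySem.List.slice sorted_commands (some st.2) (some e)), e))
        (PySem.Dict.empty, 0)
      fin.1.items
    else if strategy = "letter" then
      let letter_groups := sorted_commands.foldl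
        (fun (g : PySem.Dict String (List String)) cmd =>
          g.modify (pvFirstKey cmd) [] (fun v => v ++ [cmd]))   -- defaultdict(list) append
        PySem.Dict.empty
      let sorted_letters := PySem.List.sorted letter_groups.keys (fun x => x) false
      let sections0 := (PySem.List.pyRange 0 num_sections 1).foldl
        (fun (d : PySem.Dict Int (List String)) i => d.insert (i + 1) []) PySem.Dict.empty
      let loads0 := PySem.List.pyRepeat [(0 : Int)] num_sections
      let fin := sorted_letters.foldl (pvAStep letter_groups) (sections0, loads0)
      fin.1.items
    else []               -- Python: raise ValueError("Unknown strategy") — excluded by Pre_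

-- ===== PORT B =====
-- Python tuple comparison on (load, index) pairs: lexicographic <
def pvLexLt (a b : Int × Int) : Bool := a.1 < b.1 || (a.1 == b.1 && a.2 < b.2)

-- _insort's for loop: walk pq, return early at the first element > item
def pvInsortLoop (done rest : List (Int × Int)) (item : Int × Int) : List (Int × Int) :=
  match rest with
  | [] => done ++ [item]
  | o :: t => if pvLexLt item o then done ++ item :: o :: t else pvInsortLoop (done ++ [o]) t item

def pvInsort (pq : List (Int × Int)) (item : Int × Int) : List (Int × Int) :=
  pvInsortLoop [] pq item

-- B's balanced while loop: slice a chunk off the front of `rest` each turn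
def pvBalLoop (sections : PySem.Dict Int (List String)) (rest : List String)
    (section_id num_sections q r : Int) : PySem.Dict Int (List String) :=
  if _h : section_id ≤ num_sections then
    let take := q + (if 0 < r then 1 else 0)
    pvBalLoop (sections.insert section_id (PySem.List.slice rest none (some take)))
      (PySem.List.slice rest (some take) none) (section_id + 1) num_sections q (r - 1)
  else sections
termination_by (num_sections + 1 - section_id).toNat
decreasing_by simp_wf; omega

-- loop body of B's "for letter in sorted(groups)" (pop pq front, re-insert)
def pvBStep (groups : PySem.Dict String (List String))
    (st : List (List String) × List (Int × Int)) (letter : String) :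
    List (List String) × List (Int × Int) :=
  let group := groups.getD letter []
  match st.2 with
  | [] => st            -- Python: pq[0] raises IndexError — excluded by Pre_
  | (load, idx) :: rest =>
    (PySem.List.pySetD st.1 idx (PySem.List.pyGetD st.1 idx [] ++ group),
     pvInsort rest (load + PySem.List.len group, idx))

def create_sections_by_letter_range_alt (commands : List String) (num_sections : Int) (strategy : String) : List (Int × List String) :=
  if commands = [] then []
  else
    let sorted_commands := PySem.List.sorted commands (fun x => x) false
    if strategy = "balanced" then
      let q := PySem.Int.floordiv (PySem.List.len sorted_commands) num_sections
      let r := PySem.Int.mod (PySem.List.len sorted_commands) num_sections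
      (pvBalLoop PySem.Dict.empty sorted_commands 1 num_sections q r).items
    else if strategy = "letter" then
      let groups := sorted_commands.foldl
        (fun (g : PySem.Dict String (List String)) cmd =>
          (g.setdefault (pvFirstKey cmd) []).modify (pvFirstKey cmd) [] (fun v => v ++ [cmd]))  -- groups.setdefault(key, []).append(cmd)
        PySem.Dict.empty
      let buckets0 : List (List String) := (PySem.List.pyRange 0 num_sections 1).map (fun _ => [])
      let pq0 : List (Int × Int) := (PySem.List.pyRange 0 num_sections 1).map (fun i => (0, i))
      let fin := (PySem.List.sorted groups.keys (fun x => x) false).foldl (pvBStep groups) (buckets0, pq0)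
      (PySem.List.enumerate fin.1 0).map (fun p => (p.1 + 1, p.2))
    else []               -- Python: raise ValueError("Unknown strategy") — excluded by Pre_

-- ===== PRECONDITION & SPEC =====
-- Pre_ excludes exactly the inputs where Python A raises: ZeroDivisionError ("balanced"
-- with num_sections = 0 and commands nonempty), ValueError (min of the empty loads list:
-- "letter" with num_sections < 1 and commands nonempty), and ValueError for an unknown
-- strategy with commands nonempty.
def Pre_create_sections_by_letter_range (commands : List String) (num_sections : Int) (strategy : String) : Prop :=
  commands = [] ∨ (strategy = "balanced" ∧ num_sections ≠ 0) ∨ (strategy = "letter" ∧ 1 ≤ num_sections)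
instance (commands : List String) (num_sections : Int) (strategy : String) : Decidable (Pre_create_sections_by_letter_range commands num_sections strategy) := by unfold Pre_create_sections_by_letter_range; infer_instance

def pvWitness_create_sections_by_letter_range : List String × Int × String := (["banana", "apple", "cherry"], 2, "letter")

def Spec_create_sections_by_letter_range (commands : List String) (num_sections : Int) (strategy : String) (out : List (Int × List String)) : Prop := out = create_sections_by_letter_range_alt commands num_sections strategy
instance (commands : List String) (num_sections : Int) (strategy : String) (out : List (Int × List String)) : Decidable (Spec_create_sections_by_letter_range commands num_sections strategy out) := by unfold Spec_create_sections_by_letter_range; infer_instance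

-- ===== CLAIM (what is proved, stated in full; the proofs are below) =====
def Claim_equal_create_sections_by_letter_range : Prop := ∀ (commands : List String) (num_sections : Int) (strategy : String), Dom_create_sections_by_letter_range commands num_sections strategy → Pre_create_sections_by_letter_range commands num_sections strategy → Spec_create_sections_by_letter_range commands num_sections strategy (create_sections_by_letter_range commands num_sections strategy)

-- ===== LEMMAS AND PROOFS =====

-- materialization of B's bucket list as the items list A's section dict carries
def pvShift (bs : List (List String)) : List (Int × List String) :=
  (PySem.List.enumerate bs 0).map (fun p => (p.1 + 1, p.2))

lemma pv_sd_modify (g : PySem.Dict String (List String)) (k : String) (f : List String → List String) :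
    (g.setdefault k []).modify k [] f = g.modify k [] f := by
  by_cases h : g.contains k = true
  · rw [PySem.Dict.setdefault_of_contains g [] h]
  · have h' : g.contains k = false := by simpa using h
    rw [PySem.Dict.setdefault_of_not_contains g [] h']
    show (g.insert k []).insert k (f ((g.insert k []).getD k [])) = g.insert k (f (g.getD k []))
    rw [PySem.Dict.getD_insert_self, PySem.Dict.insert_insert_self, PySem.Dict.getD_of_not_contains g [] h']

lemma pv_groups_eq (cmds : List String) :
    cmds.foldl (fun (g : PySem.Dict String (List String)) cmd =>
        (g.setdefault (pvFirstKey cmd) []).modify (pvFirstKey cmd) [] (fun v => v ++ [cmd])) PySem.Dict.empty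
    = cmds.foldl (fun (g : PySem.Dict String (List String)) cmd =>
        g.modify (pvFirstKey cmd) [] (fun v => v ++ [cmd])) PySem.Dict.empty := by
  exact PySem.List.foldl_congr_mem _ _ _ _ (fun acc x _ => pv_sd_modify acc (pvFirstKey x) _)

-- ---- balanced branch: A's index fold equals B's chunk-consuming loop ----
lemma pv_balAB (s : List String) (q r n : Int) (hq : 0 ≤ q) :
    ∀ (m : Nat) (a start : Int) (d : PySem.Dict Int (List String)),
      (n - a).toNat = m → 0 ≤ start →
      ((PySem.List.pyRange a n 1).foldl
        (fun (st : PySem.Dict Int (List String) × Int) i =>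
          let e := st.2 + q + (if i < r then 1 else 0)
          (st.1.insert (i + 1) (PySem.List.slice s (some st.2) (some e)), e))
        (d, start)).1
      = pvBalLoop d (s.drop start.toNat) (a + 1) n q (r - a) := by
  intro m
  induction m with
  | zero =>
    intro a start d hm hst
    rw [PySem.List.pyRange_one_eq_nil (by omega), List.foldl_nil, pvBalLoop]
    rw [dif_neg (by omega)]
  | succ m ih =>
    intro a start d hm hst
    have hab : a < n := by omega
    rw [PySem.List.pyRange_one_cons hab, List.foldl_cons, pvBalLoop, dif_pos (by omega : a + 1 ≤ n)]
    simp only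
    have hcond : (if 0 < r - a then (1 : Int) else 0) = (if a < r then (1 : Int) else 0) := by
      have : (0 < r - a) ↔ (a < r) := by omega
      rw [if_congr this rfl rfl]
    have hext : (0 : Int) ≤ (if a < r then (1 : Int) else 0) := by split_ifs <;> omega
    have htake : PySem.List.slice (s.drop start.toNat) none
        (some (q + (if 0 < r - a then (1 : Int) else 0)))
        = PySem.List.slice s (some start) (some (start + q + (if a < r then (1 : Int) else 0))) := by
      rw [hcond]
      have h1 : PySem.List.slice (s.drop start.toNat) none (some (q + (if a < r then (1 : Int) else 0)))
          = (s.drop start.toNat).take (q + (if a < r then (1 : Int) else 0)).toNat :=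
        PySem.List.slice_to _ (by omega)
      have h2 : PySem.List.slice s (some start) (some (start + q + (if a < r then (1 : Int) else 0)))
          = (s.drop start.toNat).take ((start + q + (if a < r then (1 : Int) else 0)).toNat - start.toNat) :=
        PySem.List.slice_toNat s (by omega) (by omega)
      rw [h1, h2]
      congr 1
      omega
    have hdrop : PySem.List.slice (s.drop start.toNat)
        (some (q + (if 0 < r - a then (1 : Int) else 0))) none
        = s.drop (start + q + (if a < r then (1 : Int) else 0)).toNat := by
      rw [hcond]
      have h1 : PySem.List.slice (s.drop start.toNat) (some (q + (if a < r then (1 : Int) else 0))) none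
          = (s.drop start.toNat).drop (q + (if a < r then (1 : Int) else 0)).toNat :=
        PySem.List.slice_from _ (by omega)
      rw [h1, List.drop_drop]
      congr 1
      omega
    rw [htake, hdrop, show r - a - 1 = r - (a + 1) by ring]
    exact ih (a + 1) (start + q + (if a < r then (1 : Int) else 0))
      (d.insert (a + 1) (PySem.List.slice s (some start) (some (start + q + (if a < r then (1 : Int) else 0)))))
      (by omega) (by omega)

-- ---- letter branch: pq invariant machinery ----
-- strict lexicographic order on (load, index)
def pvLtP (a b : Int × Int) : Prop := a.1 < b.1 ∨ (a.1 = b.1 ∧ a.2 < b.2)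

-- the multiset of (load, index) pairs carried by A's loads list
def pvSwapEnum (loads : List Int) : List (Int × Int) :=
  (PySem.List.enumerate loads 0).map (fun p => (p.2, p.1))

lemma pv_length_swapEnum (loads : List Int) : (pvSwapEnum loads).length = loads.length := by
  simp [pvSwapEnum, PySem.List.length_enumerate]

lemma pv_getElem_swapEnum (loads : List Int) (k : Nat) (hk : k < loads.length) :
    (pvSwapEnum loads)[k]'(by rw [pv_length_swapEnum]; exact hk) = (loads[k], (k : Int)) := by
  simp [pvSwapEnum, PySem.List.getElem_enumerate]

lemma pv_mem_swapEnum (loads : List Int) (p : Int × Int) :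
    p ∈ pvSwapEnum loads ↔ ∃ (k : Nat) (_ : k < loads.length), p = (loads[k], (k : Int)) := by
  simp only [pvSwapEnum, List.mem_map, PySem.List.mem_enumerate_iff]
  constructor
  · rintro ⟨q, ⟨k, hk, rfl⟩, rfl⟩; exact ⟨k, hk, by simp⟩
  · rintro ⟨k, hk, rfl⟩; exact ⟨((k : Int), loads[k]), ⟨k, hk, by simp⟩, rfl⟩

lemma pv_insortLoop_shift (item : Int × Int) :
    ∀ (rest done : List (Int × Int)), pvInsortLoop done rest item = done ++ pvInsortLoop [] rest item := by
  intro rest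
  induction rest with
  | nil => intro done; simp [pvInsortLoop]
  | cons o t ih =>
    intro done
    simp only [pvInsortLoop]
    by_cases h : pvLexLt item o = true
    · rw [if_pos h, if_pos h]; simp
    · rw [if_neg h, if_neg h, ih (done ++ [o])]
      simp only [List.nil_append]
      rw [ih [o]]
      simp

lemma pv_insort_perm (x : Int × Int) : ∀ (l : List (Int × Int)), (pvInsort l x).Perm (x :: l) := by
  intro l
  induction l with
  | nil => simp [pvInsort, pvInsortLoop]
  | cons o t ih =>
    simp only [pvInsort, pvInsortLoop]
    by_cases h : pvLexLt x o = true
    · rw [if_pos h]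
      simp only [List.nil_append]
      exact List.Perm.refl _
    · rw [if_neg h, pv_insortLoop_shift x t]
      simp only [List.nil_append, List.singleton_append]
      exact (List.Perm.cons o ih).trans (List.Perm.swap x o t)

lemma pv_ltP_trans {a b c : Int × Int} (h1 : pvLtP a b) (h2 : pvLtP b c) : pvLtP a c := by
  unfold pvLtP at *; omega

lemma pv_nlt_lt {o x : Int × Int} (h : ¬ pvLexLt x o = true) (hne : o.2 ≠ x.2) : pvLtP o x := by
  simp [pvLexLt] at h; unfold pvLtP; omega

lemma pv_lt_lt {o x : Int × Int} (h : pvLexLt x o = true) : pvLtP x o := by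
  simp [pvLexLt] at h; unfold pvLtP; omega

lemma pv_insort_pairwise (x : Int × Int) :
    ∀ (l : List (Int × Int)), l.Pairwise pvLtP → (∀ o ∈ l, o.2 ≠ x.2) →
      (pvInsort l x).Pairwise pvLtP := by
  intro l
  induction l with
  | nil => intro _ _; simp [pvInsort, pvInsortLoop]
  | cons o t ih =>
    intro hp hne
    rw [List.pairwise_cons] at hp
    simp only [pvInsort, pvInsortLoop]
    by_cases h : pvLexLt x o = true
    · rw [if_pos h]
      have hxo : pvLtP x o := pv_lt_lt h
      simp only [List.nil_append]
      refine List.pairwise_cons.mpr ⟨?_, List.pairwise_cons.mpr hp⟩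
      intro y hy
      rcases List.mem_cons.mp hy with rfl | hyt
      · exact hxo
      · exact pv_ltP_trans hxo (hp.1 y hyt)
    · rw [if_neg h, pv_insortLoop_shift]
      have hins := ih hp.2 (fun o ho => hne o (List.mem_cons_of_mem _ ho))
      simp only [List.nil_append, List.singleton_append]
      refine List.pairwise_cons.mpr ⟨fun y hy => ?_, hins⟩
      rcases List.mem_cons.mp ((pv_insort_perm x t).mem_iff.mp hy) with rfl | hyt
      · exact pv_nlt_lt h (hne o List.mem_cons_self)
      · exact hp.1 y hyt

-- the head of the sorted pq is (min load, its first index)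
lemma pv_head (loads : List Int) (pq : List (Int × Int)) (hne : loads ≠ [])
    (hsort : pq.Pairwise pvLtP) (hperm : pq.Perm (pvSwapEnum loads)) :
    ∃ (m : Int) (k : Nat) (rest : List (Int × Int)) (hk : k < loads.length),
      pq = (m, (k : Int)) :: rest ∧ loads[k] = m ∧
      PySem.List.min? loads (fun x => x) = some m ∧
      PySem.List.index? loads m = some k := by
  have hlenpq : pq.length = loads.length := by
    rw [hperm.length_eq, pv_length_swapEnum]
  have hpqne : pq ≠ [] := by
    intro h
    rw [h] at hlenpq
    exact hne (List.length_eq_zero_iff.mp hlenpq.symm)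
  obtain ⟨p, rest, rfl⟩ := List.exists_cons_of_ne_nil hpqne
  obtain ⟨j, hj, rfl⟩ := (pv_mem_swapEnum loads p).mp (hperm.subset List.mem_cons_self)
  have hsort' := List.pairwise_cons.mp hsort
  -- the head's load is minimal, and its index is the first attaining it
  have hmin : ∀ (i : Nat) (hi : i < loads.length), loads[j] ≤ loads[i] := by
    intro i hi
    have hmem : (loads[i], (i : Int)) ∈ (loads[j], (j : Int)) :: rest :=
      hperm.mem_iff.mpr ((pv_mem_swapEnum loads _).mpr ⟨i, hi, rfl⟩)
    rcases List.mem_cons.mp hmem with heq | hr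
    · rw [Prod.ext_iff] at heq
      omega
    · have := hsort'.1 _ hr
      unfold pvLtP at this
      simp only at this
      omega
  have hfirst : ∀ (i : Nat) (hij : i < j), loads[i]'(by omega) ≠ loads[j] := by
    intro i hij heq'
    have hmem : (loads[i]'(by omega), (i : Int)) ∈ (loads[j], (j : Int)) :: rest :=
      hperm.mem_iff.mpr ((pv_mem_swapEnum loads _).mpr ⟨i, by omega, rfl⟩)
    rcases List.mem_cons.mp hmem with heq | hr
    · rw [Prod.ext_iff] at heq
      simp only [Int.natCast_inj] at heq
      omega
    · have := hsort'.1 _ hr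
      unfold pvLtP at this
      simp only [heq', Nat.cast_lt] at this
      omega
  obtain ⟨m', hm'⟩ : ∃ m', PySem.List.min? loads (fun x => x) = some m' := by
    cases h : PySem.List.min? loads (fun x => x) with
    | none => exact absurd ((PySem.List.min?_eq_none_iff _ _).mp h) hne
    | some m' => exact ⟨m', rfl⟩
  have h1 : m' ≤ loads[j] := PySem.List.min?_isMin hm' _ (List.getElem_mem hj)
  have h2 : loads[j] ≤ m' := by
    obtain ⟨i, hi, hei⟩ := List.mem_iff_getElem.mp (PySem.List.min?_mem hm')
    rw [← hei]
    exact hmin i hi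
  have hidx : PySem.List.index? loads loads[j] = some j := by
    rw [PySem.List.index?_eq_some_iff]
    refine ⟨loads.take j, loads.drop (j + 1), ?_, by simp [List.length_take]; omega, ?_⟩
    · conv_lhs => rw [← List.take_append_drop j loads, ← List.getElem_cons_drop hj]
    · intro hmem
      rw [List.mem_iff_getElem] at hmem
      obtain ⟨i, hi, hei⟩ := hmem
      rw [List.getElem_take] at hei
      have hij : i < j := by simp [List.length_take] at hi; omega
      exact hfirst i hij hei
  exact ⟨loads[j], j, rest, hj, rfl, rfl, by rw [hm', le_antisymm h1 h2], hidx⟩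

-- cons/eraseIdx decompositions used to move between pq and the loads list
lemma pv_cons_eraseIdx {α : Type} (E : List α) (k : Nat) (hk : k < E.length) :
    E.Perm (E[k] :: E.eraseIdx k) := by
  have hEd : E.drop k = E[k] :: E.drop (k + 1) := (List.getElem_cons_drop hk).symm
  conv_lhs => rw [← List.take_append_drop k E, hEd]
  rw [List.eraseIdx_eq_take_drop_succ]
  exact List.perm_middle

lemma pv_eraseIdx_snd (loads : List Int) (k : Nat) (hk : k < loads.length) :
    ∀ o ∈ (pvSwapEnum loads).eraseIdx k, o.2 ≠ (k : Int) := by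
  intro o ho
  rw [List.mem_iff_getElem] at ho
  obtain ⟨j, hj, hoe⟩ := ho
  rw [List.getElem_eraseIdx hj] at hoe
  have hklen : k < (pvSwapEnum loads).length := by rw [pv_length_swapEnum]; exact hk
  by_cases hjk : j < k
  · rw [dif_pos hjk] at hoe
    have hjl : j < loads.length := by omega
    rw [show ((pvSwapEnum loads)[j]'(by omega)) = (loads[j], (j : Int)) from pv_getElem_swapEnum loads j hjl] at hoe
    rw [← hoe]
    simp only [ne_eq, Int.natCast_inj]
    omega
  · rw [dif_neg hjk] at hoe
    have hjl : j + 1 < loads.length := by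
      have := List.length_eraseIdx_of_lt hklen
      rw [pv_length_swapEnum] at *
      omega
    rw [show ((pvSwapEnum loads)[j + 1]'(by rw [pv_length_swapEnum]; omega)) = (loads[j + 1], ((j + 1 : Nat) : Int)) from pv_getElem_swapEnum loads (j + 1) hjl] at hoe
    rw [← hoe]
    simp only [ne_eq, Int.natCast_inj]
    omega

lemma pv_swapEnum_set (loads : List Int) (k : Nat) (hk : k < loads.length) (v : Int) :
    (pvSwapEnum (loads.set k v)).Perm ((v, (k : Int)) :: (pvSwapEnum loads).eraseIdx k) := by
  have hklen : k < (pvSwapEnum loads).length := by rw [pv_length_swapEnum]; exact hk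
  have he : pvSwapEnum (loads.set k v) = (pvSwapEnum loads).set k (v, (k : Int)) := by
    apply List.ext_getElem
    · simp [pv_length_swapEnum]
    · intro j h1 h2
      have hj : j < loads.length := by simpa [pv_length_swapEnum] using h1
      rw [pv_getElem_swapEnum (loads.set k v) j (by simpa using hj), List.getElem_set,
          List.getElem_set]
      by_cases hjk : k = j
      · subst hjk; simp
      · rw [if_neg hjk, if_neg hjk, pv_getElem_swapEnum loads j hj]
  rw [he, List.set_eq_take_cons_drop _ hklen, List.eraseIdx_eq_take_drop_succ]
  exact List.perm_middle

-- used in the letter-branch update: rewriting A's dict modify into B's bucket set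
lemma pv_enum_set (bs : List (List String)) (k : Nat) (hk : k < bs.length) (v : List String) :
    (pvShift bs).map (fun p => if p.1 == (k : Int) + 1 then ((k : Int) + 1, v) else p) = pvShift (bs.set k v) := by
  unfold pvShift
  apply List.ext_getElem
  · simp [PySem.List.length_enumerate]
  · intro j h1 h2
    have hj : j < bs.length := by
      simpa [PySem.List.length_enumerate] using h1
    simp only [List.getElem_map, PySem.List.getElem_enumerate, List.getElem_set, beq_iff_eq]
    by_cases hjk : j = k
    · subst hjk; simp
    · have h2' : ¬(k = j) := fun h => hjk h.symm
      simp [h2', hjk]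

-- one parallel step of A's letter loop and B's pq loop
lemma pv_letter_stepAB (G : PySem.Dict String (List String)) (n : Int) (hn : 1 ≤ n)
    (letter : String) (d : PySem.Dict Int (List String)) (bs : List (List String))
    (loads : List Int) (pq : List (Int × Int))
    (hl : loads.length = n.toNat) (hb : bs.length = n.toNat) (hd : d.items = pvShift bs)
    (hsort : pq.Pairwise pvLtP) (hperm : pq.Perm (pvSwapEnum loads)) :
    (pvAStep G (d, loads) letter).1.items = pvShift (pvBStep G (bs, pq) letter).1 ∧
    (pvBStep G (bs, pq) letter).1.length = n.toNat ∧
    (pvAStep G (d, loads) letter).2.length = n.toNat ∧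
    (pvBStep G (bs, pq) letter).2.Pairwise pvLtP ∧
    (pvBStep G (bs, pq) letter).2.Perm (pvSwapEnum (pvAStep G (d, loads) letter).2) := by
  have hlne : loads ≠ [] := by
    intro h; rw [h] at hl; simp at hl; omega
  obtain ⟨m, k, rest, hk, rfl, hload, hm, hidx⟩ := pv_head loads pq hlne hsort hperm
  have hkb : k < bs.length := by omega
  have hklen : k < (pvSwapEnum loads).length := by rw [pv_length_swapEnum]; exact hk
  simp only [pvAStep, pvBStep, hm, hidx]
  -- A's loads update is loads.set k (m + group size)
  have hA2 : PySem.List.pySetD loads (k : Int)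
      (PySem.List.pyGetD loads (k : Int) 0 + PySem.List.len (G.getD letter []))
      = loads.set k (m + PySem.List.len (G.getD letter [])) := by
    rw [PySem.List.pySetD_natCast, PySem.List.pyGetD_natCast,
        List.getD_eq_getElem loads 0 hk, hload]
  -- rest is (a permutation of) the pq of the other loads
  have hrest_perm : rest.Perm ((pvSwapEnum loads).eraseIdx k) := by
    refine List.Perm.cons_inv (a := (m, (k : Int))) ?_
    refine hperm.trans ?_
    have := pv_cons_eraseIdx (pvSwapEnum loads) k hklen
    rwa [pv_getElem_swapEnum loads k hk, hload] at this
  -- the dict d has exactly the keys 1..n, in section order, with nodup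
  have hnodup : d.keys.Nodup := by
    have hkeys : d.keys = (PySem.List.enumerate bs 0).map (fun p => p.1 + 1) := by
      simp only [PySem.Dict.keys, hd, pvShift, List.map_map]
      rfl
    rw [hkeys, show (fun (p : Int × List String) => p.1 + 1) = (fun x : Int => x + 1) ∘ (fun p : Int × List String => p.1) from rfl,
        ← List.map_map, PySem.List.map_fst_enumerate]
    exact (PySem.List.nodup_pyRange_one _ _).map (fun a b h => by omega)
  have hmem_items : (((k : Int) + 1, bs[k]'hkb) ∈ d.items) := by
    rw [hd]
    refine List.mem_map.2 ⟨((0 : Int) + (k : Int), bs[k]'hkb), ?_, by simp⟩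
    have := PySem.List.getElem_enumerate bs 0 k (by rw [PySem.List.length_enumerate]; exact hkb)
    rw [← this]
    exact List.getElem_mem _
  have hcont : d.contains ((k : Int) + 1) = true := by
    rw [PySem.Dict.contains_iff_mem_keys]
    exact PySem.Dict.mem_keys_of_mem_items d hmem_items
  have hgetD : d.getD ((k : Int) + 1) [] = bs[k]'hkb :=
    PySem.Dict.getD_of_mem_items d hmem_items hnodup []
  refine ⟨?_, ?_, ?_, ?_, ?_⟩
  · show (d.insert ((k : Int) + 1)
        ((d.getD ((k : Int) + 1) []) ++ G.getD letter [])).items = _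
    rw [PySem.Dict.items_insert_of_contains d _ hcont, hgetD, hd, pv_enum_set bs k hkb]
    rw [PySem.List.pySetD_natCast, PySem.List.pyGetD_natCast, List.getD_eq_getElem bs [] hkb]
  · simp [PySem.List.pySetD_natCast, hb]
  · simp only [hA2, List.length_set]
    exact hl
  · refine pv_insort_pairwise _ rest (List.pairwise_cons.mp hsort).2 ?_
    intro o ho
    exact pv_eraseIdx_snd loads k hk o (hrest_perm.subset ho)
  · simp only [hA2]
    refine (pv_insort_perm _ rest).trans ?_
    refine (List.Perm.cons _ hrest_perm).trans ?_
    exact (pv_swapEnum_set loads k hk _).symm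

lemma pv_letter_foldAB (G : PySem.Dict String (List String)) (n : Int) (hn : 1 ≤ n) :
    ∀ (ls : List String) (d : PySem.Dict Int (List String)) (bs : List (List String))
      (loads : List Int) (pq : List (Int × Int)),
      loads.length = n.toNat → bs.length = n.toNat → d.items = pvShift bs →
      pq.Pairwise pvLtP → pq.Perm (pvSwapEnum loads) →
      (ls.foldl (pvAStep G) (d, loads)).1.items
        = pvShift (ls.foldl (pvBStep G) (bs, pq)).1 := by
  intro ls
  induction ls with
  | nil => intro d bs loads pq _ _ hd _ _; simpa using hd
  | cons letter ls ih =>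
    intro d bs loads pq hl hb hd hsort hperm
    obtain ⟨h1, h2, h3, h4, h5⟩ := pv_letter_stepAB G n hn letter d bs loads pq hl hb hd hsort hperm
    rw [List.foldl_cons, List.foldl_cons,
        show pvAStep G (d, loads) letter
          = ((pvAStep G (d, loads) letter).1, (pvAStep G (d, loads) letter).2) from rfl,
        show pvBStep G (bs, pq) letter
          = ((pvBStep G (bs, pq) letter).1, (pvBStep G (bs, pq) letter).2) from rfl]
    exact ih _ _ _ _ h3 h2 h1 h4 h5

-- initial states agree
lemma pvShift_const (n : Int) :
    pvShift ((PySem.List.pyRange 0 n 1).map (fun _ => ([] : List String)))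
    = (PySem.List.pyRange 0 n 1).map (fun i => (i + 1, ([] : List String))) := by
  unfold pvShift
  apply List.ext_getElem
  · simp [PySem.List.length_enumerate]
  · intro j h1 h2
    simp [PySem.List.getElem_enumerate, PySem.List.getElem_pyRange_one]

lemma pv_init (n : Int) :
    ((PySem.List.pyRange 0 n 1).foldl
      (fun (d : PySem.Dict Int (List String)) i => d.insert (i + 1) []) PySem.Dict.empty).items
    = pvShift ((PySem.List.pyRange 0 n 1).map (fun _ => [])) := by
  rw [PySem.Dict.items_foldl_insert_fresh (PySem.List.pyRange 0 n 1) (fun i => i + 1) (fun _ => []) PySem.Dict.empty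
        (fun a _ => PySem.Dict.contains_empty _)
        ((PySem.List.nodup_pyRange_one 0 n).map (fun a b h => by omega)), pvShift_const]
  simp [PySem.Dict.empty]

lemma pv_pq0 (n : Int) :
    ((PySem.List.pyRange 0 n 1).map (fun i => ((0 : Int), i)))
      = pvSwapEnum (List.replicate n.toNat 0) := by
  apply List.ext_getElem
  · simp [pv_length_swapEnum, PySem.List.length_pyRange_one]
  · intro j h1 h2
    have hj : j < n.toNat := by simpa [PySem.List.length_pyRange_one] using h1
    rw [pv_getElem_swapEnum _ j (by simpa using hj)]
    simp [PySem.List.getElem_pyRange_one]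

lemma pv_pq0_pairwise (n : Int) :
    ((PySem.List.pyRange 0 n 1).map (fun i => ((0 : Int), i))).Pairwise pvLtP := by
  refine (PySem.List.pairwise_lt_pyRange_one 0 n).map _ ?_
  intro a b h
  exact Or.inr ⟨rfl, h⟩

-- ===== VERDICT (by name: the statement is the Claim_ definition above) =====
theorem create_sections_by_letter_range_spec : Claim_equal_create_sections_by_letter_range := by
  intro commands n strategy _ hpre
  unfold Spec_create_sections_by_letter_range
  unfold create_sections_by_letter_range create_sections_by_letter_range_alt
  by_cases hc : commands = []
  · simp [hc]
  · simp only [if_neg hc]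
    by_cases hbal : strategy = "balanced"
    · simp only [if_pos hbal]
      set s := PySem.List.sorted commands (fun x => x) false with hs
      set q := PySem.Int.floordiv (PySem.List.len s) n with hq
      set r := PySem.Int.mod (PySem.List.len s) n with hr
      by_cases hn : 1 ≤ n
      · have hq0 : 0 ≤ q := by
          rw [hq, PySem.Int.floordiv_eq_ediv_of_pos (by omega)]
          exact Int.ediv_nonneg (by simp [PySem.List.len_eq]) (by omega)
        have := pv_balAB s q r n hq0 n.toNat 0 0 PySem.Dict.empty (by omega) le_rfl
        simp only [List.drop_zero, Int.toNat_zero, sub_zero, zero_add] at this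
        rw [this]
      · rw [PySem.List.pyRange_one_eq_nil (by omega), List.foldl_nil, pvBalLoop]
        simp [show ¬((1:Int) ≤ n) from hn]
    · simp only [if_neg hbal]
      by_cases hlet : strategy = "letter"
      · simp only [if_pos hlet]
        have hn : 1 ≤ n := by
          rcases hpre with h | ⟨h, _⟩ | ⟨_, h⟩
          · exact absurd h hc
          · exact absurd h hbal
          · exact h
        rw [pv_groups_eq]
        refine pv_letter_foldAB _ n hn _ _ _ _ _
          (by rw [PySem.List.pyRepeat_singleton]; simp)
          (by simp [PySem.List.length_pyRange_one])
          (pv_init n) (pv_pq0_pairwise n)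
          (by rw [PySem.List.pyRepeat_singleton, pv_pq0])
      · simp only [if_neg hlet]
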